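-- pv_equiv track=rewrite | github.com/rschaeff/pyECOD | scripts/direct_hhsearch_processor.py | calculate_range
-- ===== SOURCE A (Python) =====
-- def calculate_range(alignment, start_pos):
--     """Calculate range from alignment"""
--     ranges = []
--     current_range_start = None
--     current_pos = start_pos
--
--     for char in alignment:
--         if char != '-':  # Not a gap
--             if current_range_start is None:
--                 current_range_start = current_pos
--             current_pos += 1
--         else:  # Gap
--             if current_range_start is not None:
--                 ranges.append(f"{current_range_start}-{current_pos-1}")
--                 current_range_start = None
--
--     # Add the last range if exists
--     if current_range_start is not None:
--         ranges.append(f"{current_range_start}-{current_pos-1}")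
--
--     return ",".join(ranges)
-- ===== SOURCE B (Python) =====
-- def calculate_range(alignment, start_pos):
--     """Calculate range from alignment"""
--     ranges = []
--     pos = start_pos
--     for seg in alignment.split('-'):
--         if seg:
--             ranges.append(f"{pos}-{pos + len(seg) - 1}")
--             pos += len(seg)
--     return ",".join(ranges)
-- ===== Notes on version B (the rewrite author's own statement) =====
-- stated objective: idiomatic
-- what changed: Replaced the per-character state machine (optional run-start tracked across iterations, plus a trailing flush) by splitting the alignment on '-' and emitting one range per non-empty segment while advancing a position counter.
import Mathlib
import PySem

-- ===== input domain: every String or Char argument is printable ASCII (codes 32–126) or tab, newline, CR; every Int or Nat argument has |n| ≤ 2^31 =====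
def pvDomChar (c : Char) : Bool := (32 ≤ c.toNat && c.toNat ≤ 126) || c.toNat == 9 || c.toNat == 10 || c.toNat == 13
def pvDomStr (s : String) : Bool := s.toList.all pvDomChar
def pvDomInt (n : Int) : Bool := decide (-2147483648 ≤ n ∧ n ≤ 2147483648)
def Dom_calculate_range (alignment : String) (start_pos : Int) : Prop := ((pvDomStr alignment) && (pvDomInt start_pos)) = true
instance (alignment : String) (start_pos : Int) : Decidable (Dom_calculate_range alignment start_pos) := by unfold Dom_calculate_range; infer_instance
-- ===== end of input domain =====

-- B replaces A's per-character state machine by splitting on '-' and emitting one range per non-empty segment (idiomatic; same cost).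


-- ===== PORT A =====
-- f"{a}-{b}"
def pvFmt (a b : Int) : String := PySem.Int.toStr a ++ "-" ++ PySem.Int.toStr b

-- the loop body of A (the for-loop's one iteration)
def stepA (st : List String × Option Int × Int) (c : Char) : List String × Option Int × Int :=
  let (ranges, cur, pos) := st
  if c ≠ '-' then
    match cur with
    | none => (ranges, some pos, pos + 1)
    | some s => (ranges, some s, pos + 1)
  else
    match cur with
    | some s => (ranges ++ [pvFmt s (pos - 1)], none, pos)
    | none => (ranges, none, pos)

-- literal port of A: one fold over the characters with state (ranges, current_range_start, current_pos), then the final flush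
def calculate_range (alignment : String) (start_pos : Int) : String :=
  let st := alignment.toList.foldl stepA ([], none, start_pos)
  let ranges := match st.2.1 with
    | some s => st.1 ++ [pvFmt s (st.2.2 - 1)]
    | none => st.1
  PySem.Str.join "," ranges

-- ===== PORT B =====
-- the loop body of B (the for-loop's one iteration)
def stepB (st : List String × Int) (seg : List Char) : List String × Int :=
  let (ranges, pos) := st
  if seg.isEmpty then st
  else (ranges ++ [pvFmt pos (pos + seg.length - 1)], pos + (seg.length : Int))

-- literal port of B: split on '-', then one fold over the segments with state (ranges, pos)
def calculate_range_alt (alignment : String) (start_pos : Int) : String :=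
  let segs := PySem.Chars.splitOn alignment.toList ['-']
  let st := segs.foldl stepB ([], start_pos)
  PySem.Str.join "," st.1

-- ===== PRECONDITION & SPEC =====
def Spec_calculate_range (alignment : String) (start_pos : Int) (out : String) : Prop := out = calculate_range_alt alignment start_pos
instance (alignment : String) (start_pos : Int) (out : String) : Decidable (Spec_calculate_range alignment start_pos out) := by unfold Spec_calculate_range; infer_instance

-- ===== CLAIM (what is proved, stated in full; the proofs are below) =====
def Claim_equal_calculate_range : Prop := ∀ (alignment : String) (start_pos : Int), Dom_calculate_range alignment start_pos → Spec_calculate_range alignment start_pos (calculate_range alignment start_pos)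

-- ===== LEMMAS AND PROOFS =====

-- simple structural recursion computing split on '-'
def split1 : List Char → List (List Char)
  | [] => [[]]
  | c :: cs =>
    if c = '-' then [] :: split1 cs
    else
      match split1 cs with
      | [] => [[c]]
      | s :: ss => (c :: s) :: ss

def mapHead (f : List Char → List Char) : List (List Char) → List (List Char)
  | [] => []
  | x :: xs => f x :: xs

theorem split1_ne_nil (cs : List Char) : split1 cs ≠ [] := by
  cases cs with
  | nil => simp [split1]
  | cons c cs =>
    simp only [split1]
    split
    · simp
    · split <;> simp

theorem splitOn_go_eq (fuel : Nat) : ∀ (l cur : List Char) (accs : List (List Char)),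
    l.length < fuel →
    PySem.Chars.splitOn.go ['-'] fuel l cur accs = accs.reverse ++ mapHead (cur.reverse ++ ·) (split1 l) := by
  induction fuel with
  | zero => intro l cur accs h; omega
  | succ f ih =>
    intro l cur accs h
    cases l with
    | nil => simp [PySem.Chars.splitOn.go, split1, mapHead]
    | cons c rest =>
      rw [PySem.Chars.splitOn.go.eq_def]
      by_cases hc : c = '-'
      · subst hc
        have hp : List.isPrefixOf ['-'] ('-' :: rest) = true := by simp [List.isPrefixOf]
        simp only [hp, if_true, List.length_nil, List.drop_zero, List.drop, List.length_cons] at *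
        rw [ih rest [] (cur.reverse :: accs) (by simpa using Nat.lt_of_succ_lt_succ h)]
        rcases hs : split1 rest with _ | ⟨s, ss⟩
        · exact absurd hs (split1_ne_nil rest)
        · simp [split1, mapHead, hs]
      · have hp : List.isPrefixOf ['-'] (c :: rest) = false := by
          simp [List.isPrefixOf]; exact fun h' => absurd h'.symm hc
        simp only [hp, Bool.false_eq_true, if_false]
        rw [ih rest (c :: cur) accs (by simpa using Nat.lt_of_succ_lt_succ h)]
        rcases hs : split1 rest with _ | ⟨s, ss⟩
        · exact absurd hs (split1_ne_nil rest)
        · simp [split1, mapHead, hs, hc]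

theorem splitOn_eq_split1 (cs : List Char) : PySem.Chars.splitOn cs ['-'] = split1 cs := by
  rw [PySem.Chars.splitOn, splitOn_go_eq (cs.length + 1) cs [] [] (by omega)]
  rcases hs : split1 cs with _ | ⟨s, ss⟩
  · exact absurd hs (split1_ne_nil cs)
  · simp [mapHead]

-- A's loop as a recursion (for the induction) and its agreement with the fold in the port
def loopA : List Char → List String → Option Int → Int → List String
  | [], acc, none, _ => acc
  | [], acc, some s, p => acc ++ [pvFmt s (p - 1)]
  | c :: cs, acc, cur, p =>
    if c ≠ '-' then
      match cur with
      | none => loopA cs acc (some p) (p + 1)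
      | some s => loopA cs acc (some s) (p + 1)
    else
      match cur with
      | some s => loopA cs (acc ++ [pvFmt s (p - 1)]) none p
      | none => loopA cs acc none p

def loopB : List (List Char) → List String → Int → List String
  | [], acc, _ => acc
  | seg :: segs, acc, p =>
    if seg.isEmpty then loopB segs acc p
    else loopB segs (acc ++ [pvFmt p (p + seg.length - 1)]) (p + seg.length)

theorem foldA_loop (cs : List Char) : ∀ (acc : List String) (cur : Option Int) (p : Int),
    PySem.Str.join "," (match (cs.foldl stepA (acc, cur, p)).2.1 with
     | some s => (cs.foldl stepA (acc, cur, p)).1 ++ [pvFmt s ((cs.foldl stepA (acc, cur, p)).2.2 - 1)]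
     | none => (cs.foldl stepA (acc, cur, p)).1) = PySem.Str.join "," (loopA cs acc cur p) := by
  induction cs with
  | nil =>
    intro acc cur p
    cases cur <;> simp [loopA, List.foldl]
  | cons c cs ih =>
    intro acc cur p
    by_cases hc : c = '-' <;> cases cur <;>
      simp [loopA, List.foldl, stepA, hc, ih]

theorem foldB_loop (segs : List (List Char)) : ∀ (acc : List String) (p : Int),
    PySem.Str.join "," (segs.foldl stepB (acc, p)).1 = PySem.Str.join "," (loopB segs acc p) := by
  induction segs with
  | nil => intro acc p; simp [loopB, List.foldl]
  | cons seg segs ih =>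
    intro acc p
    by_cases h : seg.isEmpty <;>
      simp [loopB, List.foldl, stepB, h, ih]

theorem calcA_eq (a : String) (p : Int) :
    calculate_range a p = PySem.Str.join "," (loopA a.toList [] none p) := by
  exact foldA_loop a.toList [] none p

theorem calcB_eq (a : String) (p : Int) :
    calculate_range_alt a p = PySem.Str.join "," (loopB (split1 a.toList) [] p) := by
  unfold calculate_range_alt
  rw [splitOn_eq_split1]
  exact foldB_loop (split1 a.toList) [] p

-- the main correspondence: A's state machine vs B's segment loop
theorem loopA_loopB (cs : List Char) :
    (∀ (acc : List String) (p : Int), loopA cs acc none p = loopB (split1 cs) acc p) ∧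
    (∀ (acc : List String) (s p : Int),
      loopA cs acc (some s) p =
        match split1 cs with
        | [] => acc
        | seg0 :: segs => loopB segs (acc ++ [pvFmt s (p + seg0.length - 1)]) (p + seg0.length)) := by
  induction cs with
  | nil =>
    constructor
    · intro acc p; simp [loopA, split1, loopB]
    · intro acc s p; simp [loopA, split1, loopB]
  | cons c cs ih =>
    obtain ⟨ihP, ihQ⟩ := ih
    constructor
    · intro acc p
      by_cases hc : c = '-'
      · simp [loopA, split1, loopB, hc, ihP]
      · have h := ihQ acc p (p + 1)
        rcases hs : split1 cs with _ | ⟨seg0, segs⟩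
        · exact absurd hs (split1_ne_nil cs)
        · simp only [hs] at h
          have e1 : p + 1 + (seg0.length : Int) - 1 = p + ((seg0.length : Int) + 1) - 1 := by ring
          have e2 : p + 1 + (seg0.length : Int) = p + ((seg0.length : Int) + 1) := by ring
          rw [e1, e2] at h
          simp [loopA, split1, hc, hs, loopB, h]
    · intro acc s p
      by_cases hc : c = '-'
      · simp [loopA, split1, loopB, hc, ihP]
      · have h := ihQ acc s (p + 1)
        rcases hs : split1 cs with _ | ⟨seg0, segs⟩
        · exact absurd hs (split1_ne_nil cs)
        · simp only [hs] at h
          have e1 : p + 1 + (seg0.length : Int) - 1 = p + ((seg0.length : Int) + 1) - 1 := by ring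
          have e2 : p + 1 + (seg0.length : Int) = p + ((seg0.length : Int) + 1) := by ring
          rw [e1, e2] at h
          simp [loopA, split1, hc, hs, loopB, h]

-- ===== VERDICT (by name: the statement is the Claim_ definition above) =====
theorem calculate_range_spec : Claim_equal_calculate_range := by
  intro alignment start_pos _
  unfold Spec_calculate_range
  rw [calcA_eq, calcB_eq, (loopA_loopB alignment.toList).1]
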